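-- pv_equiv track=rewrite | github.com/NoahLin97/fate | fate_flow/utils/schedule_utils.py | federated_order_reset
-- ===== SOURCE A (Python) =====
-- def federated_order_reset(dest_partys, scheduler_partys_info):
--     dest_partys_new = []
--     scheduler = []
--     dest_party_ids_dict = {}
--     for dest_role, dest_party_ids in dest_partys:
--         from copy import deepcopy
--         new_dest_party_ids = deepcopy(dest_party_ids)
--         dest_party_ids_dict[dest_role] = new_dest_party_ids
--         for scheduler_role, scheduler_party_id in scheduler_partys_info:
--             if dest_role == scheduler_role and scheduler_party_id in dest_party_ids:
--                 dest_party_ids_dict[dest_role].remove(scheduler_party_id)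
--                 scheduler.append((scheduler_role, [scheduler_party_id]))
--         if dest_party_ids_dict[dest_role]:
--             dest_partys_new.append((dest_role, dest_party_ids_dict[dest_role]))
--     if scheduler:
--         dest_partys_new.extend(scheduler)
--     return dest_partys_new
-- ===== SOURCE B (Python) =====
-- def federated_order_reset(dest_partys, scheduler_partys_info):
--     # Group scheduler info by role once, then handle each dest party with a
--     # multiset (counter) of matched ids instead of rescanning all scheduler
--     # entries and calling list.remove per match.
--     by_role = {}
--     for role, pid in scheduler_partys_info:
--         by_role[role] = by_role.get(role, []) + [pid]
--     result = []
--     scheduler = []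
--     for role, ids in dest_partys:
--         matches = [p for p in by_role.get(role, []) if p in ids]
--         scheduler.extend((role, [p]) for p in matches)
--         need = {}
--         for p in matches:
--             need[p] = need.get(p, 0) + 1
--         remaining = []
--         for x in ids:
--             if need.get(x, 0) > 0:
--                 need[x] = need[x] - 1
--             else:
--                 remaining.append(x)
--         if remaining:
--             result.append((role, remaining))
--     result.extend(scheduler)
--     return result
-- ===== Notes on version B (the rewrite author's own statement) =====
-- stated objective: faster
-- what changed: B groups scheduler_partys_info by role once and, per dest party, removes matched ids with a single counter-guided pass over the id list, instead of A's rescan of all scheduler entries per dest party with a list.remove (inner scan) per match.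
import Mathlib
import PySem

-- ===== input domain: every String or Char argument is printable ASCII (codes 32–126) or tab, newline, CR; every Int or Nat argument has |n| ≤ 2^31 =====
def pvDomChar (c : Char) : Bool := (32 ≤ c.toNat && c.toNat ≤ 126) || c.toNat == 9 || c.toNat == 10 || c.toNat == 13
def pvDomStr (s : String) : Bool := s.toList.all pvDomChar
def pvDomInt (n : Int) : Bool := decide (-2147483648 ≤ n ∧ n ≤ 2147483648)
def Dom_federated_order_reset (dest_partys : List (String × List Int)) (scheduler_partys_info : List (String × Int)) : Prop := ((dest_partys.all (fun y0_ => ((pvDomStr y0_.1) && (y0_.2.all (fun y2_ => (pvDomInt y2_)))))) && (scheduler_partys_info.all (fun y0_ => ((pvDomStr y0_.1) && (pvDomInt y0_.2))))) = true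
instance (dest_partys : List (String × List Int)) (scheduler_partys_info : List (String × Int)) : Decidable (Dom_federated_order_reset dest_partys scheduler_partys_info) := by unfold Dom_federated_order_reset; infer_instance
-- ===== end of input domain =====

-- B groups the scheduler info by role once and strips matched ids with one counter-guided
-- pass per dest party, replacing A's per-dest rescan of all scheduler entries (objective: faster).

-- ===== PORT A =====
-- inner loop body of A: 'for scheduler_role, scheduler_party_id in scheduler_partys_info: …'
def pvStepA (role : String) (ids : List Int)
    (s : List (String × List Int) × PySem.Dict String (List Int)) (sp : String × Int) :
    List (String × List Int) × PySem.Dict String (List Int) :=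
  if role == sp.1 && ids.contains sp.2 then
    match PySem.List.remove? (s.2.getD role []) sp.2 with
    | some l => (s.1 ++ [(sp.1, [sp.2])], s.2.insert role l)
    | none => s   -- Python raises ValueError here; excluded by Pre_federated_order_reset
  else s

def federated_order_reset (dest_partys : List (String × List Int)) (scheduler_partys_info : List (String × Int)) : List (String × List Int) :=
  let st := dest_partys.foldl (fun (st : List (String × List Int) × List (String × List Int) × PySem.Dict String (List Int)) dp =>
      let d1 := st.2.2.insert dp.1 dp.2        -- dest_party_ids_dict[dest_role] = deepcopy(dest_party_ids)
      let inner := scheduler_partys_info.foldl (pvStepA dp.1 dp.2) (st.2.1, d1)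
      let cur := inner.2.getD dp.1 []
      (if cur ≠ [] then st.1 ++ [(dp.1, cur)] else st.1, inner.1, inner.2))
    ([], [], PySem.Dict.empty)
  if st.2.1 ≠ [] then st.1 ++ st.2.1 else st.1

-- ===== PORT B =====
def federated_order_reset_alt (dest_partys : List (String × List Int)) (scheduler_partys_info : List (String × Int)) : List (String × List Int) :=
  let byRole := scheduler_partys_info.foldl
      (fun (d : PySem.Dict String (List Int)) p => d.modify p.1 [] (· ++ [p.2])) PySem.Dict.empty
  let st := dest_partys.foldl (fun (st : List (String × List Int) × List (String × List Int)) dp =>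
      let ms := (byRole.getD dp.1 []).filter (fun p => dp.2.contains p)
      let sch := st.2 ++ ms.map (fun p => (dp.1, ([p] : List Int)))
      let need := ms.foldl (fun (d : PySem.Dict Int Int) p => d.modify p 0 (· + 1)) PySem.Dict.empty
      let fin := dp.2.foldl (fun (s : PySem.Dict Int Int × List Int) x =>
          if s.1.getD x 0 > 0 then (s.1.insert x (s.1.getD x 0 - 1), s.2) else (s.1, s.2 ++ [x]))
        (need, ([] : List Int))
      (if fin.2 ≠ [] then st.1 ++ [(dp.1, fin.2)] else st.1, sch))
    ([], [])
  st.1 ++ st.2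

-- ===== PRECONDITION & SPEC =====
-- Pre_ excludes exactly the inputs on which A raises ValueError: some dest party's id list
-- contains an id v fewer times than scheduler_partys_info contains the matching (role, v) entry.
def Pre_federated_order_reset (dest_partys : List (String × List Int)) (scheduler_partys_info : List (String × Int)) : Prop :=
  ∀ dp ∈ dest_partys, ∀ v ∈ dp.2, scheduler_partys_info.count (dp.1, v) ≤ dp.2.count v
instance (dest_partys : List (String × List Int)) (scheduler_partys_info : List (String × Int)) : Decidable (Pre_federated_order_reset dest_partys scheduler_partys_info) := by unfold Pre_federated_order_reset; infer_instance

def pvWitness_federated_order_reset : (List (String × List Int)) × (List (String × Int)) :=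
  ([("guest", [1, 2]), ("host", [3])], [("guest", 1), ("arbiter", 9)])

def Spec_federated_order_reset (dest_partys : List (String × List Int)) (scheduler_partys_info : List (String × Int)) (out : List (String × List Int)) : Prop := out = federated_order_reset_alt dest_partys scheduler_partys_info
instance (dest_partys : List (String × List Int)) (scheduler_partys_info : List (String × Int)) (out : List (String × List Int)) : Decidable (Spec_federated_order_reset dest_partys scheduler_partys_info out) := by unfold Spec_federated_order_reset; infer_instance

-- ===== CLAIM (what is proved, stated in full; the proofs are below) =====
def Claim_equal_federated_order_reset : Prop := ∀ (dest_partys : List (String × List Int)) (scheduler_partys_info : List (String × Int)), Dom_federated_order_reset dest_partys scheduler_partys_info → Pre_federated_order_reset dest_partys scheduler_partys_info → Spec_federated_order_reset dest_partys scheduler_partys_info (federated_order_reset dest_partys scheduler_partys_info)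
-- ===== LEMMAS AND PROOFS =====

-- the ids A's inner loop matches (in scheduler order) for one dest party (role, ids)
def pvMsA (role : String) (ids : List Int) (sched : List (String × Int)) : List Int :=
  (sched.filter (fun p => role == p.1 && ids.contains p.2)).map (·.2)

-- sequential list.remove, as A performs it on the copied id list
def pvSeqRem (ids ms : List Int) : List Int :=
  ms.foldl (fun l p => (PySem.List.remove? l p).getD l) ids

-- B's counter-guided single pass
def pvCrem (d : PySem.Dict Int Int) (ids acc : List Int) : PySem.Dict Int Int × List Int :=
  ids.foldl (fun s x => if s.1.getD x 0 > 0 then (s.1.insert x (s.1.getD x 0 - 1), s.2) else (s.1, s.2 ++ [x])) (d, acc)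

lemma pvCrem_cons (d : PySem.Dict Int Int) (x : Int) (t acc : List Int) :
    pvCrem d (x :: t) acc =
      if d.getD x 0 > 0 then pvCrem (d.insert x (d.getD x 0 - 1)) t acc
      else pvCrem d t (acc ++ [x]) := by
  by_cases h : d.getD x 0 > 0 <;> simp [pvCrem, h]

-- functional view of the counter pass (dict replaced by its lookup function)
def pvCremL (f : Int → Int) : List Int → List Int
  | [] => []
  | x :: t => if f x > 0 then pvCremL (Function.update f x (f x - 1)) t else x :: pvCremL f t

lemma pvCrem_eq_cremL (ids : List Int) : ∀ (d : PySem.Dict Int Int) (acc : List Int),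
    (pvCrem d ids acc).2 = acc ++ pvCremL (fun k => d.getD k 0) ids := by
  induction ids with
  | nil => intro d acc; simp [pvCrem, pvCremL]
  | cons x t ih =>
    intro d acc
    rw [pvCrem_cons]
    by_cases h : d.getD x 0 > 0
    · rw [if_pos h, ih]
      have hf : (fun k => (d.insert x (d.getD x 0 - 1)).getD k 0)
          = Function.update (fun k => d.getD k 0) x (d.getD x 0 - 1) := by
        funext k
        rw [PySem.Dict.getD_insert, Function.update_apply]
      rw [hf, pvCremL, if_pos h]
    · rw [if_neg h, ih]
      rw [pvCremL, if_neg h]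
      simp

lemma pvCremL_zero (ids : List Int) : ∀ (f : Int → Int),
    (∀ k, f k ≤ 0) → pvCremL f ids = ids := by
  induction ids with
  | nil => intro f _; rfl
  | cons x t ih =>
    intro f h
    rw [pvCremL, if_neg (by simpa using h x), ih f h]

lemma pvCremL_dec (ids : List Int) : ∀ (f : Int → Int) (p : Int),
    p ∈ ids → (∀ k, 0 ≤ f k) →
    pvCremL (Function.update f p (f p + 1)) ids = pvCremL f (ids.erase p) := by
  induction ids with
  | nil => intro _ _ h; exact absurd h (List.not_mem_nil)
  | cons x t ih =>
    intro f p hp hnn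
    by_cases hx : x = p
    · subst hx
      rw [List.erase_cons_head, pvCremL,
        if_pos (by rw [Function.update_self]; linarith [hnn x])]
      have : Function.update (Function.update f x (f x + 1)) x (Function.update f x (f x + 1) x - 1) = f := by
        rw [Function.update_self, Function.update_idem]
        simp
      rw [this]
    · have hpt : p ∈ t := by
        rcases List.mem_cons.mp hp with h | h
        · exact absurd h.symm hx
        · exact h
      rw [List.erase_cons_tail (by simpa using fun h : x = p => hx h), pvCremL, pvCremL,
        Function.update_of_ne hx]
      by_cases hgt : f x > 0
      · rw [if_pos hgt, if_pos hgt]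
        have hcomm : Function.update (Function.update f p (f p + 1)) x (f x - 1)
            = Function.update (Function.update f x (f x - 1)) p (Function.update f x (f x - 1) p + 1) := by
          rw [Function.update_of_ne (fun h : p = x => hx h.symm),
            Function.update_comm (fun h : p = x => hx h.symm)]
        rw [hcomm, ih _ p hpt (fun k => ?_)]
        rw [Function.update_apply]
        split
        · omega
        · exact hnn k
      · rw [if_neg hgt, if_neg hgt, ih f p hpt hnn]

lemma pvSeqRem_eq_cremL (ms : List Int) : ∀ (ids : List Int),
    (∀ v, ms.count v ≤ ids.count v) →
    pvSeqRem ids ms = pvCremL (fun v => (ms.count v : Int)) ids := by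
  induction ms with
  | nil =>
    intro ids _
    rw [pvCremL_zero _ _ (fun k => by simp)]
    simp [pvSeqRem]
  | cons p ps ih =>
    intro ids h
    have hmem : p ∈ ids := by
      have := h p
      simp [List.count_cons_self] at this
      exact List.count_pos_iff.mp (by omega)
    have hrem : PySem.List.remove? ids p = some (ids.erase p) :=
      PySem.List.remove?_eq_some_erase ids p hmem
    have hseq : pvSeqRem ids (p :: ps) = pvSeqRem (ids.erase p) ps := by
      simp [pvSeqRem, hrem]
    have hcount : ∀ v, ps.count v ≤ (ids.erase p).count v := by
      intro v
      have hv := h v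
      rw [List.count_cons] at hv
      rw [List.count_erase]
      simp only [beq_iff_eq] at hv ⊢
      by_cases hvp : p = v
      · subst hvp; simp at hv ⊢; omega
      · rw [if_neg hvp]
        rw [if_neg hvp] at hv
        omega
    have hfun : (fun v => ((p :: ps).count v : Int))
        = Function.update (fun v => (ps.count v : Int)) p ((ps.count p : Int) + 1) := by
      funext v
      rw [Function.update_apply, List.count_cons]
      by_cases hvp : v = p
      · simp [hvp]
      · have hvp' : ¬ p = v := fun h => hvp h.symm
        simp [hvp, hvp']
    rw [hseq, ih _ hcount, hfun,
      pvCremL_dec _ _ p hmem (fun k => by positivity)]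

lemma pvMsA_cons (role : String) (ids : List Int) (sp : String × Int) (rest : List (String × Int)) :
    pvMsA role ids (sp :: rest) =
      if role == sp.1 && ids.contains sp.2 then sp.2 :: pvMsA role ids rest else pvMsA role ids rest := by
  simp only [pvMsA, List.filter_cons]
  by_cases h : (role == sp.1 && ids.contains sp.2) = true
  · rw [if_pos h, if_pos h, List.map_cons]
  · rw [if_neg h, if_neg h]

lemma pvMsA_count (role : String) (ids : List Int) (v : Int) (hv : v ∈ ids) :
    ∀ sched : List (String × Int), (pvMsA role ids sched).count v = sched.count (role, v) := by
  intro sched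
  induction sched with
  | nil => rfl
  | cons sp rest ih =>
    rw [pvMsA_cons]
    by_cases hc : (role == sp.1 && ids.contains sp.2) = true
    · rw [if_pos hc]
      have hr : role = sp.1 := by
        have := (Bool.and_eq_true _ _).mp hc |>.1
        exact beq_iff_eq.mp this
      rw [List.count_cons, List.count_cons, ih]
      by_cases hsv : sp.2 = v
      · have hsp : sp = (role, v) := by
          apply Prod.ext <;> simp [hr.symm, hsv]
        simp [hsp]
      · have hsp : ¬ sp = (role, v) := fun h => hsv (congrArg Prod.snd h)
        simp [hsv, hsp]
    · rw [if_neg hc, ih, List.count_cons]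
      have hsp : ¬ sp = (role, v) := by
        intro h
        apply hc
        rw [h]
        simp [hv]
      simp [hsp]

lemma pvMsA_subset (role : String) (ids : List Int) (sched : List (String × Int)) (v : Int)
    (hv : v ∈ pvMsA role ids sched) : v ∈ ids := by
  simp only [pvMsA, List.mem_map, List.mem_filter] at hv
  obtain ⟨p, ⟨_, hp⟩, rfl⟩ := hv
  have := (Bool.and_eq_true _ _).mp hp |>.2
  exact List.contains_iff_mem.mp this

lemma pvMsA_count_le (role : String) (ids : List Int) (sched : List (String × Int))
    (hpre : ∀ v ∈ ids, sched.count (role, v) ≤ ids.count v) :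
    ∀ v, (pvMsA role ids sched).count v ≤ ids.count v := by
  intro v
  by_cases hv : v ∈ ids
  · rw [pvMsA_count role ids v hv]; exact hpre v hv
  · rw [List.count_eq_zero_of_not_mem (fun h => hv (pvMsA_subset role ids sched v h))]
    exact Nat.zero_le _

lemma pvMsB_eq (role : String) (ids : List Int) (sched : List (String × Int)) :
    ((sched.filter (fun p => p.1 == role)).map (·.2)).filter (fun p => ids.contains p)
      = pvMsA role ids sched := by
  induction sched with
  | nil => rfl
  | cons sp rest ih =>
    rw [pvMsA_cons, List.filter_cons]
    by_cases h1 : sp.1 = role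
    · rw [if_pos (by simp [h1]), List.map_cons, List.filter_cons]
      by_cases h2 : ids.contains sp.2 = true
      · rw [if_pos (by simpa using h2),
          if_pos (by simp [h1, List.contains_iff_mem.mp h2]), ih]
      · rw [if_neg (by simpa using h2),
          if_neg (by simp only [Bool.and_eq_true]; intro hb; exact h2 hb.2), ih]
    · rw [if_neg (by simpa using h1),
        if_neg (by simp only [Bool.and_eq_true, beq_iff_eq]; intro hb; exact h1 hb.1.symm), ih]

lemma pvInner (role : String) (ids : List Int) :
    ∀ (sched : List (String × Int)) (sch : List (String × List Int)) (d : PySem.Dict String (List Int)),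
    (∀ v, (pvMsA role ids sched).count v ≤ (d.getD role []).count v) →
    (sched.foldl (pvStepA role ids) (sch, d)).1
        = sch ++ (pvMsA role ids sched).map (fun v => (role, ([v] : List Int)))
    ∧ (sched.foldl (pvStepA role ids) (sch, d)).2.getD role []
        = pvSeqRem (d.getD role []) (pvMsA role ids sched) := by
  intro sched
  induction sched with
  | nil => intro sch d _; simp [pvMsA, pvSeqRem]
  | cons sp rest ih =>
    intro sch d h
    rw [List.foldl_cons]
    by_cases hc : (role == sp.1 && ids.contains sp.2) = true
    · have hr : role = sp.1 := beq_iff_eq.mp ((Bool.and_eq_true _ _).mp hc).1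
      have hcnt := h sp.2
      rw [pvMsA_cons, if_pos hc, List.count_cons_self] at hcnt
      have hmemd : sp.2 ∈ d.getD role [] := List.count_pos_iff.mp (by omega)
      have hrem : PySem.List.remove? (d.getD role []) sp.2
          = some ((d.getD role []).erase sp.2) :=
        PySem.List.remove?_eq_some_erase _ _ hmemd
      have hstep : pvStepA role ids (sch, d) sp
          = (sch ++ [(sp.1, [sp.2])], d.insert role ((d.getD role []).erase sp.2)) := by
        simp only [pvStepA]
        rw [if_pos hc, hrem]
      rw [hstep]
      have hcnt' : ∀ v, (pvMsA role ids rest).count v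
          ≤ ((d.insert role ((d.getD role []).erase sp.2)).getD role []).count v := by
        intro v
        rw [PySem.Dict.getD_insert_self, List.count_erase]
        have hv := h v
        rw [pvMsA_cons, if_pos hc, List.count_cons] at hv
        by_cases hvp : sp.2 = v
        · subst hvp; simp at hv ⊢; omega
        · rw [if_neg (by simpa using hvp)]
          rw [if_neg (by simpa using hvp)] at hv
          omega
      obtain ⟨h1, h2⟩ := ih (sch ++ [(sp.1, [sp.2])]) _ hcnt'
      rw [PySem.Dict.getD_insert_self] at h2
      refine ⟨?_, ?_⟩
      · rw [h1, pvMsA_cons, if_pos hc, List.map_cons, ← hr, List.append_assoc]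
        rfl
      · rw [h2, pvMsA_cons, if_pos hc]
        simp [pvSeqRem, hrem]
    · have hstep : pvStepA role ids (sch, d) sp = (sch, d) := by
        simp only [pvStepA]
        rw [if_neg hc]
      rw [hstep]
      have hm : pvMsA role ids (sp :: rest) = pvMsA role ids rest := by
        rw [pvMsA_cons, if_neg (by simpa using hc)]
      rw [hm] at h ⊢
      exact ih sch d h

lemma pvIfAppend (out sch : List (String × List Int)) :
    (if sch ≠ [] then out ++ sch else out) = out ++ sch := by
  by_cases h : sch = [] <;> simp [h]

lemma pvOuter (sched : List (String × Int)) (byR : PySem.Dict String (List Int))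
    (hbr : ∀ r, byR.getD r [] = (sched.filter (fun p => p.1 == r)).map (·.2)) :
    ∀ (dest : List (String × List Int)) (out sch : List (String × List Int)) (d : PySem.Dict String (List Int)),
    (∀ dp ∈ dest, ∀ v ∈ dp.2, sched.count (dp.1, v) ≤ dp.2.count v) →
    ((dest.foldl (fun (st : List (String × List Int) × List (String × List Int) × PySem.Dict String (List Int)) dp =>
        let d1 := st.2.2.insert dp.1 dp.2
        let inner := sched.foldl (pvStepA dp.1 dp.2) (st.2.1, d1)
        let cur := inner.2.getD dp.1 []
        (if cur ≠ [] then st.1 ++ [(dp.1, cur)] else st.1, inner.1, inner.2)) (out, sch, d)).1,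
     (dest.foldl (fun (st : List (String × List Int) × List (String × List Int) × PySem.Dict String (List Int)) dp =>
        let d1 := st.2.2.insert dp.1 dp.2
        let inner := sched.foldl (pvStepA dp.1 dp.2) (st.2.1, d1)
        let cur := inner.2.getD dp.1 []
        (if cur ≠ [] then st.1 ++ [(dp.1, cur)] else st.1, inner.1, inner.2)) (out, sch, d)).2.1)
    = dest.foldl (fun (st : List (String × List Int) × List (String × List Int)) dp =>
        let ms := (byR.getD dp.1 []).filter (fun p => dp.2.contains p)
        let sch' := st.2 ++ ms.map (fun p => (dp.1, ([p] : List Int)))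
        let need := ms.foldl (fun (d : PySem.Dict Int Int) p => d.modify p 0 (· + 1)) PySem.Dict.empty
        let fin := dp.2.foldl (fun (s : PySem.Dict Int Int × List Int) x =>
            if s.1.getD x 0 > 0 then (s.1.insert x (s.1.getD x 0 - 1), s.2) else (s.1, s.2 ++ [x]))
          (need, ([] : List Int))
        (if fin.2 ≠ [] then st.1 ++ [(dp.1, fin.2)] else st.1, sch')) (out, sch) := by
  intro dest
  induction dest with
  | nil => intro out sch d _; rfl
  | cons dp rest ih =>
    intro out sch d h
    rw [List.foldl_cons, List.foldl_cons]
    have hpre0 : ∀ v ∈ dp.2, sched.count (dp.1, v) ≤ dp.2.count v :=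
      h dp (List.mem_cons_self)
    have hcnt : ∀ v, (pvMsA dp.1 dp.2 sched).count v ≤ dp.2.count v :=
      pvMsA_count_le dp.1 dp.2 sched hpre0
    -- the A-side inner loop over this dest party
    have hcnt' : ∀ v, (pvMsA dp.1 dp.2 sched).count v
        ≤ ((d.insert dp.1 dp.2).getD dp.1 []).count v := by
      intro v; rw [PySem.Dict.getD_insert_self]; exact hcnt v
    obtain ⟨h1, h2⟩ := pvInner dp.1 dp.2 sched sch (d.insert dp.1 dp.2) hcnt'
    rw [PySem.Dict.getD_insert_self] at h2
    -- the B-side match list is exactly A's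
    have hms : (byR.getD dp.1 []).filter (fun p => dp.2.contains p) = pvMsA dp.1 dp.2 sched := by
      rw [hbr dp.1]; exact pvMsB_eq dp.1 dp.2 sched
    -- the B-side counter pass computes the same remaining ids
    have hfin : (dp.2.foldl (fun (s : PySem.Dict Int Int × List Int) x =>
          if s.1.getD x 0 > 0 then (s.1.insert x (s.1.getD x 0 - 1), s.2) else (s.1, s.2 ++ [x]))
        ((pvMsA dp.1 dp.2 sched).foldl (fun (d : PySem.Dict Int Int) p => d.modify p 0 (· + 1)) PySem.Dict.empty,
          ([] : List Int))).2
        = pvSeqRem dp.2 (pvMsA dp.1 dp.2 sched) := by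
      have hneed : (pvMsA dp.1 dp.2 sched).foldl
            (fun (d : PySem.Dict Int Int) p => d.modify p 0 (· + 1)) PySem.Dict.empty
          = PySem.Dict.counter (pvMsA dp.1 dp.2 sched) :=
        (PySem.Dict.counter_eq_foldl _).symm
      rw [hneed]
      show (pvCrem (PySem.Dict.counter (pvMsA dp.1 dp.2 sched)) dp.2 []).2 = _
      rw [pvCrem_eq_cremL, List.nil_append]
      have hf : (fun k => (PySem.Dict.counter (pvMsA dp.1 dp.2 sched)).getD k 0)
          = fun v => (((pvMsA dp.1 dp.2 sched).count v : Int)) := by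
        funext k; rw [PySem.Dict.getD_counter]
      rw [hf, ← pvSeqRem_eq_cremL _ _ hcnt]
    -- one step of each fold produces matching visible state
    show ((rest.foldl _ (_, _, _)).1, (rest.foldl _ (_, _, _)).2.1) = rest.foldl _ (_, _)
    simp only [hms, hfin, h1, h2]
    exact ih _ _ _ (fun q hq => h q (List.mem_cons_of_mem _ hq))

-- ===== VERDICT (by name: the statement is the Claim_ definition above) =====
theorem federated_order_reset_spec : Claim_equal_federated_order_reset := by
  intro dest sched _ hpre
  show federated_order_reset dest sched = federated_order_reset_alt dest sched
  simp only [federated_order_reset, federated_order_reset_alt]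
  have hbr : ∀ r, (sched.foldl (fun (d : PySem.Dict String (List Int)) p => d.modify p.1 [] (· ++ [p.2]))
      PySem.Dict.empty).getD r [] = (sched.filter (fun p => p.1 == r)).map (·.2) := by
    intro r
    rw [PySem.Dict.getD_foldl_modify_append]
    simp [PySem.Dict.getD_empty]
  have h := pvOuter sched _ hbr dest [] [] PySem.Dict.empty hpre
  have h1 := congrArg Prod.fst h
  have h2 := congrArg Prod.snd h
  dsimp only at h1 h2
  rw [h1, h2, pvIfAppend]
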